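-- pv_equiv track=rewrite | github.com/sairamkontham14-art/OFFSET_APP | poly.py | create_equations_of_adjacent_lines
-- ===== SOURCE A (Python) =====
-- def calculate_line_equation(offset_line):
--     """Calculate the equation of a line in the form Ax + By + C = 0"""
--     (x1, y1), (x2, y2) = offset_line
--     A = (y2 - y1)
--     B = -(x2 - x1)
--     C = A * x1 + B * y1
--     return (A, B, C)
--
-- def create_equations_of_adjacent_lines(offset_polygons):
--     """Create sets of two adjacent line equations for each polygon in the offset polygons."""
--     adjacent_line_equations_sets = []
--
--     for polygon in offset_polygons:
--         for i in range(len(polygon)):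
--             # Get the two consecutive lines in the polygon
--             line1 = polygon[i]
--             line2 = polygon[(i + 1) % len(polygon)]  # Wrap around to the first line at the end of the polygon
--
--             # Calculate the equations of the two lines
--             equation1 = calculate_line_equation(line1)
--             equation2 = calculate_line_equation(line2)
--
--             # Add the pair of equations as a set
--             adjacent_line_equations_sets.append((equation1, equation2))
--
--     return adjacent_line_equations_sets
-- ===== SOURCE B (Python) =====
-- def calculate_line_equation(offset_line):
--     """Calculate the equation of a line in the form Ax + By + C = 0"""
--     (x1, y1), (x2, y2) = offset_line
--     A = (y2 - y1)
--     B = -(x2 - x1)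
--     C = A * x1 + B * y1
--     return (A, B, C)
--
-- def create_equations_of_adjacent_lines(offset_polygons):
--     """Create sets of two adjacent line equations for each polygon in the offset polygons."""
--     result = []
--     for polygon in offset_polygons:
--         if not polygon:
--             continue
--         # Streaming single pass: carry the first and the previous equation,
--         # emit each (previous, current) pair as soon as the current equation
--         # is computed, and close the cycle with (last, first) at the end.
--         first_eq = calculate_line_equation(polygon[0])
--         prev = first_eq
--         for line in polygon[1:]:
--             cur = calculate_line_equation(line)
--             result.append((prev, cur))
--             prev = cur
--         result.append((prev, first_eq))
--     return result
-- ===== Notes on version B (the rewrite author's own statement) =====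
-- stated objective: alternative
-- what changed: B is a streaming single pass: it carries only the first and the previous equation, emits each (previous, current) pair the moment the current equation is computed, and closes the cycle with a final (last, first) pair, instead of A's index loop with modular wraparound that recomputes both equations at every index.
import Mathlib
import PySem

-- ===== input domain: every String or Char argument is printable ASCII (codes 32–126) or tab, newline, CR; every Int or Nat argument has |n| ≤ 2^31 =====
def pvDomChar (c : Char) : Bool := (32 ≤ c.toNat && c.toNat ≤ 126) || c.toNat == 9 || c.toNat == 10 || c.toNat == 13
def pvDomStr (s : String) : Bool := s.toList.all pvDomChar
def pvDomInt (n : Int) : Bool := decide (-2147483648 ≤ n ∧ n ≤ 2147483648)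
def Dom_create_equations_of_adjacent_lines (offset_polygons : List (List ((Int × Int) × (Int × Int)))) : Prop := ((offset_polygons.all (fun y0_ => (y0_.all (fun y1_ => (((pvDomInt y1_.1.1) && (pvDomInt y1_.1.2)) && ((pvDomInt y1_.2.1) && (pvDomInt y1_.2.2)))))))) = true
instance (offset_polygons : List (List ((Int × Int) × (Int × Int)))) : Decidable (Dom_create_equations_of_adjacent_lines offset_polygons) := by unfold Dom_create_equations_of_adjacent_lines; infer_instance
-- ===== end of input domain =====

-- B replaces A's modular-index loop (each equation computed twice) by a streaming single pass
-- that carries the previous equation and closes the cycle at the end: alternative decomposition.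

-- ===== PORT A =====
-- calculate_line_equation, as used by A
def calcLineEqA (l : (Int × Int) × (Int × Int)) : Int × Int × Int :=
  let A := l.2.2 - l.1.2
  let B := -(l.2.1 - l.1.1)
  (A, B, A * l.1.1 + B * l.1.2)

def create_equations_of_adjacent_lines (offset_polygons : List (List ((Int × Int) × (Int × Int)))) : List ((Int × Int × Int) × (Int × Int × Int)) :=
  offset_polygons.foldl (fun acc polygon =>
    (PySem.List.pyRange 0 (polygon.length : Int) 1).foldl (fun acc2 i =>
      let line1 := PySem.List.pyGetD polygon i ((0, 0), (0, 0))
      let line2 := PySem.List.pyGetD polygon (PySem.Int.mod (i + 1) (polygon.length : Int)) ((0, 0), (0, 0))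
      acc2 ++ [(calcLineEqA line1, calcLineEqA line2)]) acc) []

-- ===== PORT B =====
-- calculate_line_equation, as used by B
def calcLineEqB (l : (Int × Int) × (Int × Int)) : Int × Int × Int :=
  let A := l.2.2 - l.1.2
  let B := -(l.2.1 - l.1.1)
  (A, B, A * l.1.1 + B * l.1.2)

def create_equations_of_adjacent_lines_alt (offset_polygons : List (List ((Int × Int) × (Int × Int)))) : List ((Int × Int × Int) × (Int × Int × Int)) :=
  offset_polygons.foldl (fun acc polygon =>
    match polygon with
    | [] => acc
    | l0 :: rest =>
      let firstEq := calcLineEqB l0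
      -- the for-loop over polygon[1:], with loop state (prev, result)
      let st := rest.foldl (fun (st : (Int × Int × Int) × List ((Int × Int × Int) × (Int × Int × Int))) line =>
        let cur := calcLineEqB line
        (cur, st.2 ++ [(st.1, cur)])) (firstEq, acc)
      st.2 ++ [(st.1, firstEq)]) []

-- ===== PRECONDITION & SPEC =====
def Spec_create_equations_of_adjacent_lines (offset_polygons : List (List ((Int × Int) × (Int × Int)))) (out : List ((Int × Int × Int) × (Int × Int × Int))) : Prop := out = create_equations_of_adjacent_lines_alt offset_polygons
instance (offset_polygons : List (List ((Int × Int) × (Int × Int)))) (out : List ((Int × Int × Int) × (Int × Int × Int))) : Decidable (Spec_create_equations_of_adjacent_lines offset_polygons out) := by unfold Spec_create_equations_of_adjacent_lines; infer_instance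

-- ===== CLAIM (what is proved, stated in full; the proofs are below) =====
def Claim_equal_create_equations_of_adjacent_lines : Prop := ∀ (offset_polygons : List (List ((Int × Int) × (Int × Int)))), Dom_create_equations_of_adjacent_lines offset_polygons → Spec_create_equations_of_adjacent_lines offset_polygons (create_equations_of_adjacent_lines offset_polygons)

-- ===== LEMMAS AND PROOFS =====

theorem calcLineEq_eq : calcLineEqA = calcLineEqB := rfl

-- A's inner loop over one polygon, characterised as the equation table zipped with its rotation.
theorem inner_eq (p : List ((Int × Int) × (Int × Int))) (acc : List ((Int × Int × Int) × (Int × Int × Int))) :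
    (PySem.List.pyRange 0 (p.length : Int) 1).foldl (fun acc2 i =>
      acc2 ++ [(calcLineEqA (PySem.List.pyGetD p i ((0, 0), (0, 0))),
                calcLineEqA (PySem.List.pyGetD p (PySem.Int.mod (i + 1) (p.length : Int)) ((0, 0), (0, 0))))]) acc
    = acc ++ (p.map calcLineEqB).zip ((p.map calcLineEqB).drop 1 ++ (p.map calcLineEqB).take 1) := by
  rw [PySem.List.foldl_append_singleton_eq_map]
  congr 1
  apply List.ext_getElem
  · simp [PySem.List.length_pyRange_one, List.length_zip]
    omega
  · intro i h1 h2
    have hi : i < p.length := by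
      simpa [PySem.List.length_pyRange_one] using h1
    have hlr : i < (PySem.List.pyRange 0 (p.length : Int) 1).length := by
      simp [PySem.List.length_pyRange_one]; omega
    have hdl : i < ((p.map calcLineEqB).drop 1 ++ (p.map calcLineEqB).take 1).length := by
      simp; omega
    have hm : (i + 1) % p.length < p.length := Nat.mod_lt _ (by omega)
    have hgr : (PySem.List.pyRange 0 (p.length : Int) 1)[i]'hlr = (i : Int) := by
      rw [PySem.List.getElem_pyRange_one]; simp
    rw [List.getElem_map, List.getElem_zip, hgr]
    have hget : PySem.List.pyGetD p (i : Int) ((0, 0), (0, 0)) = p[i] := by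
      rw [PySem.List.pyGetD_natCast]
      exact List.getD_eq_getElem _ _ hi
    have hmod : PySem.Int.mod ((i : Int) + 1) (p.length : Int) = (((i + 1) % p.length : Nat) : Int) := by
      have hc : ((i : Int) + 1) = ((i + 1 : Nat) : Int) := by push_cast; ring
      rw [hc, PySem.Int.mod_natCast]
    have hget2 : PySem.List.pyGetD p (PySem.Int.mod ((i : Int) + 1) (p.length : Int)) ((0, 0), (0, 0)) = p[(i + 1) % p.length] := by
      rw [hmod, PySem.List.pyGetD_natCast]
      exact List.getD_eq_getElem _ _ hm
    have hdt : ((p.map calcLineEqB).drop 1 ++ (p.map calcLineEqB).take 1)[i]'hdl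
        = (p.map calcLineEqB)[(i + 1) % p.length]'(by simpa using hm) := by
      by_cases hlast : i + 1 < p.length
      · have hmodv : (i + 1) % p.length = i + 1 := Nat.mod_eq_of_lt hlast
        rw [List.getElem_append_left (by simp; omega)]
        simp [hmodv]
      · have h1n : i + 1 = p.length := by omega
        rw [List.getElem_append_right (by simp; omega)]
        have hz : (i + 1) % p.length = 0 := by rw [h1n]; simp
        rw [List.getElem_take]
        congr 1
        simp [hz]
        omega
    rw [hget, hget2, hdt, List.getElem_map, List.getElem_map]
    simp [calcLineEq_eq]

-- B's streaming loop, characterised the same way.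
theorem stream_eq (es : List ((Int × Int) × (Int × Int))) (prev first : Int × Int × Int)
    (acc : List ((Int × Int × Int) × (Int × Int × Int))) :
    (es.foldl (fun (st : (Int × Int × Int) × List ((Int × Int × Int) × (Int × Int × Int))) line =>
      let cur := calcLineEqB line
      (cur, st.2 ++ [(st.1, cur)])) (prev, acc)).2
      ++ [((es.foldl (fun (st : (Int × Int × Int) × List ((Int × Int × Int) × (Int × Int × Int))) line =>
      let cur := calcLineEqB line
      (cur, st.2 ++ [(st.1, cur)])) (prev, acc)).1, first)]
    = acc ++ (prev :: es.map calcLineEqB).zip (es.map calcLineEqB ++ [first]) := by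
  induction es generalizing prev acc with
  | nil => simp
  | cons x xs ih =>
    simp only [List.foldl_cons, List.map_cons]
    rw [ih]
    simp

-- the two ports agree on every input (Dom is not needed)
theorem ports_eq (polys : List (List ((Int × Int) × (Int × Int)))) :
    create_equations_of_adjacent_lines polys = create_equations_of_adjacent_lines_alt polys := by
  unfold create_equations_of_adjacent_lines create_equations_of_adjacent_lines_alt
  apply PySem.List.foldl_congr_mem
  intro acc p _
  rw [inner_eq]
  match p with
  | [] => simp
  | l0 :: rest =>
    simp only []
    rw [stream_eq]
    simp

-- ===== VERDICT (by name: the statement is the Claim_ definition above) =====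
theorem create_equations_of_adjacent_lines_spec : Claim_equal_create_equations_of_adjacent_lines := by
  intro polys _
  exact ports_eq polys
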